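-- pv_equiv track=rewrite | github.com/ocstl/advent_of_code_2018 | day_11/day_11.py | variable_size
-- ===== SOURCE A (Python) =====
-- def variable_size(x, y, grid_size, power_grid):
--     power_levels = {(x, y, 0): 0}
--     for size in range(1, grid_size - max(x, y) + 1):
--         power_levels[(x, y, size)] = (power_levels[(x, y, size-1)] - power_grid[y-1+size][x-1+size]
--                                       + sum(power_grid[y-1+size][x-1+t] for t in range(1, size+1))
--                                       + sum(power_grid[y-1+t][x-1+size] for t in range(1, size+1))
--                                       )
--
--     return max((c for c in power_levels.items()), key=lambda c: c[1])
-- ===== SOURCE B (Python) =====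
-- def variable_size(x, y, grid_size, power_grid):
--     # 2D prefix-sum table over the m x m sub-square at (x, y), then each
--     # square sum is a single O(1) table lookup; argmax by a strict-improvement scan.
--     m = grid_size - max(x, y)
--     pref = [[0] * (m + 1)]
--     for i in range(1, m + 1):
--         row = power_grid[y - 1 + i]
--         prev = pref[i - 1]
--         cur = [0]
--         run = 0
--         for j in range(1, m + 1):
--             run += row[x - 1 + j]
--             cur.append(prev[j] + run)
--         pref.append(cur)
--     best_size, best_val = 0, 0
--     for s in range(1, m + 1):
--         v = pref[s][s]
--         if v > best_val:
--             best_size, best_val = s, v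
--     return ((x, y, best_size), best_val)
-- ===== Notes on version B (the rewrite author's own statement) =====
-- stated objective: alternative
-- what changed: B replaces A's incremental L-strip recurrence stored in a dict plus a max-over-items pass by building a 2D prefix-sum table over the sub-square once and reading each square sum as one O(1) table lookup, with a strict-improvement scan for the argmax.
import Mathlib
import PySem

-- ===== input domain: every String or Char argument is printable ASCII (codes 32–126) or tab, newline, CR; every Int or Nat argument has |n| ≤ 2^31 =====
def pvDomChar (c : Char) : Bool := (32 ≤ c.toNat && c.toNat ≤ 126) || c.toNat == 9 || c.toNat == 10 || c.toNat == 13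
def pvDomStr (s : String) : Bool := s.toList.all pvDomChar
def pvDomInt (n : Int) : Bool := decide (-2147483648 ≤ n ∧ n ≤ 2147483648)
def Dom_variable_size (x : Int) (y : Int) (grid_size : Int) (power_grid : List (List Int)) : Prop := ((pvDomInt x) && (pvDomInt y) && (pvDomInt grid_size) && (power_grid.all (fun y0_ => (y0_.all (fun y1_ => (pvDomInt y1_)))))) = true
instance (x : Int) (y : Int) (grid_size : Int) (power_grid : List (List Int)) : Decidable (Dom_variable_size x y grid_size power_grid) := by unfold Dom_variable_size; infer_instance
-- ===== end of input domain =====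

-- B builds a 2D prefix-sum table over the sub-square and reads each square sum in O(1),
-- instead of A's incremental L-strip recurrence in a dict followed by max over items (objective: alternative).


-- ===== PORT A =====
def variable_size (x : Int) (y : Int) (grid_size : Int) (power_grid : List (List Int)) : (Int × Int × Int) × Int :=
  let init : PySem.Dict (Int × Int × Int) Int := PySem.Dict.ofList [((x, y, 0), 0)]
  let power_levels := (PySem.List.pyRange 1 (grid_size - max x y + 1) 1).foldl
    (fun d size =>
      d.insert (x, y, size)
        (d.getD (x, y, size - 1) 0
          - PySem.List.pyGetD (PySem.List.pyGetD power_grid (y - 1 + size) []) (x - 1 + size) 0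
          + ((PySem.List.pyRange 1 (size + 1) 1).map
              (fun t => PySem.List.pyGetD (PySem.List.pyGetD power_grid (y - 1 + size) []) (x - 1 + t) 0)).sum
          + ((PySem.List.pyRange 1 (size + 1) 1).map
              (fun t => PySem.List.pyGetD (PySem.List.pyGetD power_grid (y - 1 + t) []) (x - 1 + size) 0)).sum))
    init
  -- power_levels always holds the size-0 item, so max? is never none; the default is dead
  (PySem.List.max? power_levels.items (fun c => c.2)).getD ((x, y, 0), 0)

-- ===== PORT B =====
def variable_size_alt (x : Int) (y : Int) (grid_size : Int) (power_grid : List (List Int)) : (Int × Int × Int) × Int :=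
  let m := grid_size - max x y
  let pref : List (List Int) := (PySem.List.pyRange 1 (m + 1) 1).foldl
    (fun pref i =>
      let row := PySem.List.pyGetD power_grid (y - 1 + i) []
      let prev := PySem.List.pyGetD pref (i - 1) []
      let cr := (PySem.List.pyRange 1 (m + 1) 1).foldl
        (fun (p : List Int × Int) j =>
          let run := p.2 + PySem.List.pyGetD row (x - 1 + j) 0
          (p.1 ++ [PySem.List.pyGetD prev j 0 + run], run))
        ([0], 0)
      pref ++ [cr.1])
    [List.replicate (m + 1).toNat 0]
  let best := (PySem.List.pyRange 1 (m + 1) 1).foldl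
    (fun (b : Int × Int) s =>
      let v := PySem.List.pyGetD (PySem.List.pyGetD pref s []) s 0
      if b.2 < v then (s, v) else b)
    (0, 0)
  ((x, y, best.1), best.2)

-- ===== PRECONDITION & SPEC =====
-- Pre_ excludes exactly the inputs on which the Python raises IndexError: every cell of the
-- m × m sub-square with corner (x, y) must be a valid Python index into power_grid.
-- (the quantifier bounds are capped by the list sizes only so that the condition is cheaply
-- decidable: if the cap bites, 2·len+1 consecutive indices cannot all be valid, so some
-- capped index already fails and the condition is False exactly as with the uncapped bound)
def Pre_variable_size (x : Int) (y : Int) (grid_size : Int) (power_grid : List (List Int)) : Prop :=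
  ∀ i ∈ List.range (min (grid_size - max x y).toNat (2 * power_grid.length + 1)),
    (PySem.List.pyGet? power_grid (y + (i : Int))).isSome = true ∧
    ∀ row ∈ (PySem.List.pyGet? power_grid (y + (i : Int))).toList,
      ∀ j ∈ List.range (min (grid_size - max x y).toNat (2 * row.length + 1)),
        (PySem.List.pyGet? row (x + (j : Int))).isSome = true
instance (x : Int) (y : Int) (grid_size : Int) (power_grid : List (List Int)) : Decidable (Pre_variable_size x y grid_size power_grid) := by unfold Pre_variable_size; infer_instance

def pvWitness_variable_size : Int × Int × Int × List (List Int) := (1, 1, 2, [[1, 2], [3, 4]])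

def Spec_variable_size (x : Int) (y : Int) (grid_size : Int) (power_grid : List (List Int)) (out : (Int × Int × Int) × Int) : Prop := out = variable_size_alt x y grid_size power_grid
instance (x : Int) (y : Int) (grid_size : Int) (power_grid : List (List Int)) (out : (Int × Int × Int) × Int) : Decidable (Spec_variable_size x y grid_size power_grid out) := by unfold Spec_variable_size; infer_instance

-- ===== CLAIM (what is proved, stated in full; the proofs are below) =====
def Claim_equal_variable_size : Prop := ∀ (x : Int) (y : Int) (grid_size : Int) (power_grid : List (List Int)), Dom_variable_size x y grid_size power_grid → Pre_variable_size x y grid_size power_grid → Spec_variable_size x y grid_size power_grid (variable_size x y grid_size power_grid)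

-- ===== LEMMAS AND PROOFS =====

-- the cell of the sub-square at (row i, column j), 0-based, as both ports read it
def pvCell (x y : Int) (g : List (List Int)) (i j : Nat) : Int :=
  PySem.List.pyGetD (PySem.List.pyGetD g (y + (i : Int)) []) (x + (j : Int)) 0

-- sum of the first i rows × first j columns of the sub-square
def pvPref (x y : Int) (g : List (List Int)) (i j : Nat) : Int :=
  ((List.range i).map (fun a => ((List.range j).map (fun b => pvCell x y g a b)).sum)).sum

theorem pvPref_succ_row (x y : Int) (g : List (List Int)) (i j : Nat) :
    pvPref x y g (i + 1) j = pvPref x y g i j + ((List.range j).map (fun b => pvCell x y g i b)).sum := by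
  simp [pvPref, List.range_succ]

theorem pvPref_succ_col (x y : Int) (g : List (List Int)) (i j : Nat) :
    pvPref x y g i (j + 1) = pvPref x y g i j + ((List.range i).map (fun a => pvCell x y g a j)).sum := by
  simp [pvPref, List.range_succ]

-- the square-sum recurrence A implements
theorem pvSq_rec (x y : Int) (g : List (List Int)) (k : Nat) :
    pvPref x y g (k + 1) (k + 1)
      = pvPref x y g k k - pvCell x y g k k
        + ((List.range (k + 1)).map (fun t => pvCell x y g k t)).sum
        + ((List.range (k + 1)).map (fun t => pvCell x y g t k)).sum := by
  rw [pvPref_succ_row, pvPref_succ_col]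
  simp [List.range_succ]
  ring

-- assoc-list lookup of a freshly appended key
theorem pv_get?_append_last {κ ν : Type} [BEq κ] [LawfulBEq κ] (l : List (κ × ν)) (k : κ) (v : ν)
    (h : ∀ p ∈ l, p.1 ≠ k) : (PySem.Dict.mk (l ++ [(k, v)])).get? k = some v := by
  induction l with
  | nil => simp [PySem.Dict.get?_mk_cons]
  | cons p rest ih =>
    obtain ⟨pk, pv⟩ := p
    have hp : (pk == k) = false := by
      simpa using h (pk, pv) (List.mem_cons_self)
    simpa [PySem.Dict.get?_mk_cons, hp] using ih (fun q hq => h q (List.mem_cons_of_mem _ hq))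

-- A-side invariant: the dict after k loop iterations lists all square sums for sizes 0..k
theorem pvA_items (x y : Int) (g : List (List Int)) (k : Nat) :
    ((List.range k).map (fun t : Nat => 1 + (t : Int))).foldl
      (fun d size =>
        d.insert (x, y, size)
          (d.getD (x, y, size - 1) 0
            - PySem.List.pyGetD (PySem.List.pyGetD g (y - 1 + size) []) (x - 1 + size) 0
            + ((PySem.List.pyRange 1 (size + 1) 1).map
                (fun t => PySem.List.pyGetD (PySem.List.pyGetD g (y - 1 + size) []) (x - 1 + t) 0)).sum
            + ((PySem.List.pyRange 1 (size + 1) 1).map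
                (fun t => PySem.List.pyGetD (PySem.List.pyGetD g (y - 1 + t) []) (x - 1 + size) 0)).sum))
      (PySem.Dict.ofList [((x, y, 0), 0)])
      = PySem.Dict.mk ((List.range (k + 1)).map (fun (s : Nat) => ((x, y, (s : Int)), pvPref x y g s s))) := by
  induction k with
  | zero =>
    simp [PySem.Dict.ofList, PySem.Dict.update, PySem.Dict.insert, PySem.Dict.empty, PySem.Dict.contains, pvPref]
  | succ k ih =>
    have hsplit : (List.range (k + 1)).map (fun t : Nat => 1 + (t : Int))
        = (List.range k).map (fun t : Nat => 1 + (t : Int)) ++ [1 + (k : Int)] := by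
      rw [List.range_succ]
      simp
    rw [hsplit, List.foldl_append, ih]
    simp only [List.foldl_cons, List.foldl_nil]
    -- the key being inserted is fresh
    have hcont : (PySem.Dict.mk ((List.range (k + 1)).map
        (fun (s : Nat) => ((x, y, (s : Int)), pvPref x y g s s)))).contains (x, y, 1 + (k : Int)) = false := by
      simp only [PySem.Dict.contains_mk, List.any_map, List.any_eq_false]
      intro s hs
      simp only [Function.comp, beq_iff_eq, Prod.mk.injEq]
      rintro ⟨-, -, h3⟩
      have : s < k + 1 := List.mem_range.mp hs
      omega
    -- the looked-up previous level is the last stored item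
    have hget : (PySem.Dict.mk ((List.range (k + 1)).map
        (fun (s : Nat) => ((x, y, (s : Int)), pvPref x y g s s)))).getD (x, y, 1 + (k : Int) - 1) 0
        = pvPref x y g k k := by
      have hk : (1 + (k : Int) - 1) = (k : Int) := by ring
      rw [hk, List.range_succ, List.map_append, PySem.Dict.getD]
      simp only [List.map_cons, List.map_nil]
      rw [pv_get?_append_last]
      · rfl
      · intro p hp
        simp only [List.mem_map, List.mem_range] at hp
        obtain ⟨s, hs, rfl⟩ := hp
        simp only [ne_eq, Prod.mk.injEq, not_and]
        intro _ _
        omega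
    -- the two strip sums
    have hrow : ((PySem.List.pyRange 1 (1 + (k : Int) + 1) 1).map
          (fun t => PySem.List.pyGetD (PySem.List.pyGetD g (y - 1 + (1 + (k : Int))) []) (x - 1 + t) 0)).sum
        = ((List.range (k + 1)).map (fun t => pvCell x y g k t)).sum := by
      have hr : PySem.List.pyRange 1 (1 + (k : Int) + 1) 1
          = (List.range (k + 1)).map (fun j : Nat => 1 + (j : Int)) := by
        have ht : (1 + (k : Int) + 1 - 1).toNat = k + 1 := by omega
        rw [PySem.List.pyRange_one, ht]
      rw [hr, List.map_map]
      congr 1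
      apply List.map_congr_left
      intro j hj
      simp only [Function.comp]
      have h1 : y - 1 + (1 + (k : Int)) = y + (k : Int) := by ring
      have h2 : x - 1 + (1 + (j : Int)) = x + (j : Int) := by ring
      rw [h1, h2]
      rfl
    have hcol : ((PySem.List.pyRange 1 (1 + (k : Int) + 1) 1).map
          (fun t => PySem.List.pyGetD (PySem.List.pyGetD g (y - 1 + t) []) (x - 1 + (1 + (k : Int))) 0)).sum
        = ((List.range (k + 1)).map (fun t => pvCell x y g t k)).sum := by
      have hr : PySem.List.pyRange 1 (1 + (k : Int) + 1) 1
          = (List.range (k + 1)).map (fun j : Nat => 1 + (j : Int)) := by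
        have ht : (1 + (k : Int) + 1 - 1).toNat = k + 1 := by omega
        rw [PySem.List.pyRange_one, ht]
      rw [hr, List.map_map]
      congr 1
      apply List.map_congr_left
      intro j hj
      simp only [Function.comp]
      have h1 : y - 1 + (1 + (j : Int)) = y + (j : Int) := by ring
      have h2 : x - 1 + (1 + (k : Int)) = x + (k : Int) := by ring
      rw [h1, h2]
      rfl
    have hcorner : PySem.List.pyGetD (PySem.List.pyGetD g (y - 1 + (1 + (k : Int))) []) (x - 1 + (1 + (k : Int))) 0
        = pvCell x y g k k := by
      have h1 : y - 1 + (1 + (k : Int)) = y + (k : Int) := by ring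
      have h2 : x - 1 + (1 + (k : Int)) = x + (k : Int) := by ring
      rw [h1, h2]
      rfl
    rw [PySem.Dict.insert, hcont]
    simp only [Bool.false_eq_true, if_false]
    rw [hget, hrow, hcol, hcorner]
    rw [List.range_succ (n := k + 1), List.map_append]
    congr 1
    simp only [List.map_cons, List.map_nil]
    have hv : pvPref x y g k k - pvCell x y g k k
        + ((List.range (k + 1)).map (fun t => pvCell x y g k t)).sum
        + ((List.range (k + 1)).map (fun t => pvCell x y g t k)).sum
        = pvPref x y g (k + 1) (k + 1) := (pvSq_rec x y g k).symm
    rw [hv]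
    have hk : (1 + (k : Int)) = ((k + 1 : Nat) : Int) := by push_cast; ring
    rw [hk]

-- one row of the prefix-sum table: the inner fold of B
theorem pvB_row (x y : Int) (g : List (List Int)) (n k : Nat) : ∀ t, t ≤ n →
    ((List.range t).map (fun s : Nat => 1 + (s : Int))).foldl
      (fun (p : List Int × Int) j =>
        (p.1 ++ [PySem.List.pyGetD ((List.range (n + 1)).map (fun j2 => pvPref x y g k j2)) j 0
                  + (p.2 + PySem.List.pyGetD (PySem.List.pyGetD g (y + (k : Int)) []) (x - 1 + j) 0)],
         p.2 + PySem.List.pyGetD (PySem.List.pyGetD g (y + (k : Int)) []) (x - 1 + j) 0))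
      ([0], 0)
    = ((List.range (t + 1)).map (fun j => pvPref x y g (k + 1) j),
       ((List.range t).map (fun b => pvCell x y g k b)).sum) := by
  intro t
  induction t with
  | zero =>
    intro _
    simp [pvPref]
  | succ t ih =>
    intro hlt
    have hsplit : (List.range (t + 1)).map (fun s : Nat => 1 + (s : Int))
        = (List.range t).map (fun s : Nat => 1 + (s : Int)) ++ [1 + (t : Int)] := by
      rw [List.range_succ]
      simp
    rw [hsplit, List.foldl_append, ih (by omega)]
    simp only [List.foldl_cons, List.foldl_nil]
    have hprev : PySem.List.pyGetD ((List.range (n + 1)).map (fun j2 => pvPref x y g k j2)) (1 + (t : Int)) 0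
        = pvPref x y g k (t + 1) := by
      have h1 : (1 + (t : Int)) = ((t + 1 : Nat) : Int) := by push_cast; ring
      rw [h1, PySem.List.pyGetD_natCast, PySem.List.getD_map_range _ _ _ _ (by omega)]
    have hcell : PySem.List.pyGetD (PySem.List.pyGetD g (y + (k : Int)) []) (x - 1 + (1 + (t : Int))) 0
        = pvCell x y g k t := by
      have h2 : x - 1 + (1 + (t : Int)) = x + (t : Int) := by ring
      rw [h2]
      rfl
    rw [hprev, hcell]
    simp only [Prod.mk.injEq]
    constructor
    · rw [List.range_succ (n := t + 1), List.map_append]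
      congr 1
      simp only [List.map_cons, List.map_nil]
      rw [pvPref_succ_row, List.range_succ, List.map_append]
      simp
    · rw [List.range_succ, List.map_append]
      simp

-- B-side invariant: the table after k outer iterations holds rows 0..k of the prefix sums
theorem pvB_pref (x y : Int) (g : List (List Int)) (n k : Nat) :
    ((List.range k).map (fun t : Nat => 1 + (t : Int))).foldl
      (fun pref i =>
        pref ++ [(((List.range n).map (fun t : Nat => 1 + (t : Int))).foldl
          (fun (p : List Int × Int) j =>
            (p.1 ++ [PySem.List.pyGetD (PySem.List.pyGetD pref (i - 1) []) j 0
                      + (p.2 + PySem.List.pyGetD (PySem.List.pyGetD g (y - 1 + i) []) (x - 1 + j) 0)],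
             p.2 + PySem.List.pyGetD (PySem.List.pyGetD g (y - 1 + i) []) (x - 1 + j) 0))
          ([0], 0)).1])
      [(List.range (n + 1)).map (fun j => pvPref x y g 0 j)]
      = (List.range (k + 1)).map (fun i => (List.range (n + 1)).map (fun j => pvPref x y g i j)) := by
  induction k with
  | zero => simp
  | succ k ih =>
    have hsplit : (List.range (k + 1)).map (fun t : Nat => 1 + (t : Int))
        = (List.range k).map (fun t : Nat => 1 + (t : Int)) ++ [1 + (k : Int)] := by
      rw [List.range_succ]
      simp
    rw [hsplit, List.foldl_append, ih]
    simp only [List.foldl_cons, List.foldl_nil]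
    have hrow : y - 1 + (1 + (k : Int)) = y + (k : Int) := by ring
    have hprevidx : (1 + (k : Int) - 1) = ((k : Nat) : Int) := by ring
    rw [hrow, hprevidx, PySem.List.pyGetD_natCast, PySem.List.getD_map_range _ _ _ _ (by omega)]
    rw [pvB_row x y g n k n (le_refl n)]
    rw [List.range_succ (n := k + 1), List.map_append]
    congr 1

-- Python max keeps the FIRST maximal element: max? of a nonempty list is a keep-if-strictly-greater fold
theorem pv_max?_cons {α κ : Type} [LT κ] [DecidableLT κ] (l : List α) (a : α) (key : α → κ) :
    PySem.List.max? (a :: l) key = some (l.foldl (fun m p => if key m < key p then p else m) a) := by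
  induction l generalizing a with
  | nil => rfl
  | cons b l ih =>
    have h1 : PySem.List.max? (a :: b :: l) key
        = PySem.List.max? ((if key a < key b then b else a) :: l) key := by
      simp only [PySem.List.max?, List.foldl_cons]
      split_ifs <;> rfl
    rw [h1, ih]
    simp only [List.foldl_cons]

-- the first-maximum of the listed items equals the strict-improvement scan
theorem pv_argmax (x y : Int) (f : Nat → Int) (n : Nat) (hf0 : f 0 = 0) :
    (PySem.List.max? ((List.range (n + 1)).map (fun (s : Nat) => ((x, y, (s : Int)), f s))) (fun c => c.2)).getD ((x, y, 0), 0)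
      = ((x, y, ((List.range n).foldl
            (fun (b : Int × Int) t => if b.2 < f (t + 1) then (((t : Int) + 1), f (t + 1)) else b) (0, 0)).1),
          ((List.range n).foldl
            (fun (b : Int × Int) t => if b.2 < f (t + 1) then (((t : Int) + 1), f (t + 1)) else b) (0, 0)).2) := by
  have aux : ∀ m : Nat,
      ((List.range m).map (fun t : Nat => (((x, y, ((t : Int) + 1)) : Int × Int × Int), f (t + 1)))).foldl
          (fun q p => if q.2 < p.2 then p else q) ((x, y, (0 : Int)), (0 : Int))
        = ((x, y, ((List.range m).foldl
              (fun (b : Int × Int) t => if b.2 < f (t + 1) then (((t : Int) + 1), f (t + 1)) else b) (0, 0)).1),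
            ((List.range m).foldl
              (fun (b : Int × Int) t => if b.2 < f (t + 1) then (((t : Int) + 1), f (t + 1)) else b) (0, 0)).2) := by
    intro m
    induction m with
    | zero => rfl
    | succ m ih =>
      rw [List.range_succ, List.map_append, List.foldl_append, List.foldl_append, ih]
      simp only [List.map_cons, List.map_nil, List.foldl_cons, List.foldl_nil]
      split_ifs <;> rfl
  rw [List.range_succ_eq_map, List.map_cons, List.map_map]
  have hcomp : ((fun (s : Nat) => (((x, y, (s : Int)) : Int × Int × Int), f s)) ∘ Nat.succ)
      = fun t : Nat => ((x, y, ((t : Int) + 1)), f (t + 1)) := by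
    funext t
    simp [Function.comp]
  rw [hcomp, pv_max?_cons]
  simp only [Nat.cast_zero, hf0, aux, Option.getD_some]

-- ===== VERDICT (by name: the statement is the Claim_ definition above) =====
theorem variable_size_spec : Claim_equal_variable_size := by
  intro x y gs g _hdom _hpre
  unfold Spec_variable_size
  by_cases hm : 0 ≤ gs - max x y
  · -- the loops run: both sides list/tabulate the same square sums and pick the same first maximum
    set N := (gs - max x y).toNat with hN
    have hr : PySem.List.pyRange 1 (gs - max x y + 1) 1
        = (List.range N).map (fun t : Nat => 1 + (t : Int)) := by
      have ht : (gs - max x y + 1 - 1).toNat = N := by omega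
      rw [PySem.List.pyRange_one, ht]
    have hrep : List.replicate (gs - max x y + 1).toNat (0 : Int)
        = (List.range (N + 1)).map (fun j => pvPref x y g 0 j) := by
      have ht : (gs - max x y + 1).toNat = N + 1 := by omega
      rw [ht]
      simp [pvPref]
    have hA := pv_argmax x y (fun s => pvPref x y g s s) N (by simp [pvPref])
    simp only at hA
    simp only [variable_size, variable_size_alt]
    rw [hr, hrep, pvA_items x y g N, pvB_pref x y g N N]
    rw [show (PySem.Dict.mk ((List.range (N + 1)).map
          (fun (s : Nat) => ((x, y, (s : Int)), pvPref x y g s s)))).items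
        = (List.range (N + 1)).map
          (fun (s : Nat) => ((x, y, (s : Int)), pvPref x y g s s)) from rfl]
    rw [hA, List.foldl_map]
    set P : List (List Int) :=
      (List.range (N + 1)).map (fun i => (List.range (N + 1)).map (fun j => pvPref x y g i j)) with hP
    have hB : (List.range N).foldl (fun (b : Int × Int) (t : Nat) =>
          if b.2 < PySem.List.pyGetD (PySem.List.pyGetD P (1 + (t : Int)) []) (1 + (t : Int)) 0
          then (1 + (t : Int), PySem.List.pyGetD (PySem.List.pyGetD P (1 + (t : Int)) []) (1 + (t : Int)) 0)
          else b) (0, 0)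
        = (List.range N).foldl (fun (b : Int × Int) (t : Nat) =>
          if b.2 < pvPref x y g (t + 1) (t + 1)
          then (((t : Int) + 1), pvPref x y g (t + 1) (t + 1))
          else b) (0, 0) := by
      apply PySem.List.foldl_congr_mem
      intro acc t ht
      have htn : t < N := List.mem_range.mp ht
      have h1 : (1 + (t : Int)) = ((t + 1 : Nat) : Int) := by push_cast; ring
      rw [h1, hP]
      simp only [PySem.List.pyGetD_natCast]
      rw [PySem.List.getD_map_range _ _ _ _ (by omega : t + 1 < N + 1),
          PySem.List.getD_map_range _ _ _ _ (by omega : t + 1 < N + 1)]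
      push_cast
      rfl
    rw [hB]
  · -- the sub-square is empty: both sides return ((x, y, 0), 0)
    have hnil : PySem.List.pyRange 1 (gs - max x y + 1) 1 = [] := by
      apply PySem.List.pyRange_one_eq_nil
      omega
    simp [variable_size, variable_size_alt, hnil, PySem.Dict.ofList, PySem.Dict.update,
      PySem.Dict.insert, PySem.Dict.empty, PySem.Dict.contains, PySem.List.max?]
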